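-- pv_equiv track=rewrite | github.com/shahpriyesh/PracticeCode | HashMapQuestions/IncreasingDecreasingString.py | incDecString
-- ===== SOURCE A (Python) =====
-- import collections
--
-- def incDecString(s):
--     counter = collections.Counter(s)
--     res = ''
--     while counter:
--         for c in sorted(counter):
--             res += c
--             counter[c] -= 1
--             if counter[c] == 0:
--                 del counter[c]
--
--         for c in sorted(counter, reverse=True):
--             res += c
--             counter[c] -= 1
--             if counter[c] == 0:
--                 del counter[c]
--
--     return res
-- ===== SOURCE B (Python) =====
-- import collections
--
-- def incDecString(s):
--     counter = collections.Counter(s)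
--     letters = sorted(counter)
--     maxfreq = max(counter.values(), default=0)
--     parts = []
--     for p in range(1, maxfreq + 1):
--         row = [c for c in letters if counter[c] >= p]
--         if p % 2 == 0:
--             row.reverse()
--         parts.append(''.join(row))
--     return ''.join(parts)
-- ===== Notes on version B (the rewrite author's own statement) =====
-- stated objective: alternative
-- what changed: Replaces the mutate-and-delete while loop over a shrinking Counter by a direct pass-indexed construction: pass p (1..maxfreq) takes the sorted letters whose count is >= p, reversed when p is even, with no mutation of the counter.
import Mathlib
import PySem

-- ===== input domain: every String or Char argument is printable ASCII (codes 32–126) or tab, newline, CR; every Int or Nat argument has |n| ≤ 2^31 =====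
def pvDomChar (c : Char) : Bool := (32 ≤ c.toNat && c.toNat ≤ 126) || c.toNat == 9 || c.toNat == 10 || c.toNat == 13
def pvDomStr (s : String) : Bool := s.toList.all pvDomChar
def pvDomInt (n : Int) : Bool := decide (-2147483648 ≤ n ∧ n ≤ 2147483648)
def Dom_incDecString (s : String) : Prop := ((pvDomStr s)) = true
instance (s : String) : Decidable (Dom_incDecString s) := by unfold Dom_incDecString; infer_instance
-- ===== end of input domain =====

-- B replaces A's mutate-and-delete while loop over a shrinking Counter by a direct
-- pass-indexed construction (pass p takes the sorted letters with count ≥ p, reversed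
-- when p is even); objective: alternative (no counter mutation, same result).

-- ===== PORT A =====
-- one body of A's inner for-loops: res += c; counter[c] -= 1; if counter[c] == 0: del counter[c]
def pvStepA (st : List Char × PySem.Dict Char Int) (c : Char) : List Char × PySem.Dict Char Int :=
  let res := st.1 ++ [c]
  let d := st.2.modify c 0 (fun v => v - 1)
  if d.getD c 0 == 0 then (res, d.erase c) else (res, d)

-- the while loop; fuel only makes it total (it is never exhausted on a counter built from s)
def pvLoopA : Nat → List Char → PySem.Dict Char Int → List Char
  | 0, res, _ => res
  | fuel+1, res, d =>
    if d.size == 0 then res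
    else
      let st1 := (PySem.List.sorted d.keys (fun c => c) false).foldl pvStepA (res, d)
      let st2 := (PySem.List.sorted st1.2.keys (fun c => c) true).foldl pvStepA st1
      pvLoopA fuel st2.1 st2.2

def incDecString (s : String) : String :=
  String.ofList (pvLoopA (s.toList.length + 1) [] (PySem.Dict.counter s.toList))

-- ===== PORT B =====
def incDecString_alt (s : String) : String :=
  let counter := PySem.Dict.counter s.toList
  let letters := PySem.List.sorted counter.keys (fun c => c) false
  let maxfreq := PySem.List.maxD counter.values (fun v => v) 0
  let parts := (PySem.List.pyRange 1 (maxfreq + 1) 1).foldl (fun parts p =>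
      let row := letters.filter (fun c => decide (counter.getD c 0 ≥ p))
      let row := if PySem.Int.mod p 2 == 0 then row.reverse else row
      parts ++ [row]) []
  String.ofList parts.flatten

-- ===== PRECONDITION & SPEC =====
def Spec_incDecString (s : String) (out : String) : Prop := out = incDecString_alt s
instance (s : String) (out : String) : Decidable (Spec_incDecString s out) := by unfold Spec_incDecString; infer_instance

-- ===== CLAIM (what is proved, stated in full; the proofs are below) =====
def Claim_equal_incDecString : Prop := ∀ (s : String), Dom_incDecString s → Spec_incDecString s (incDecString s)

-- ===== LEMMAS AND PROOFS =====

-- proof-side characterisations of A's loop state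
def pvDec1 (c : Char) (d : PySem.Dict Char Int) : PySem.Dict Char Int :=
  ⟨d.items.filterMap (fun p => if p.1 = c then (if p.2 = 1 then none else some (p.1, p.2 - 1)) else some p)⟩

def pvDecOn (L : List Char) (d : PySem.Dict Char Int) : PySem.Dict Char Int :=
  ⟨d.items.filterMap (fun p => if p.1 ∈ L then (if p.2 = 1 then none else some (p.1, p.2 - 1)) else some p)⟩

def pvDecAll (d : PySem.Dict Char Int) : PySem.Dict Char Int :=
  ⟨d.items.filterMap (fun p => if p.2 = 1 then none else some (p.1, p.2 - 1))⟩

def pvLetters (d : PySem.Dict Char Int) : List Char :=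
  PySem.List.sorted d.keys (fun c => c) false

def pvRow (d : PySem.Dict Char Int) (p : Nat) : List Char :=
  let row := (pvLetters d).filter (fun c => decide (d.getD c 0 ≥ (p : Int)))
  if p % 2 == 0 then row.reverse else row

def pvOut (d : PySem.Dict Char Int) (m : Nat) : List Char :=
  ((List.range m).map (fun i => pvRow d (i+1))).flatten

lemma pv_keys_filterMap_sublist (f : Char × Int → Option (Char × Int))
    (hf : ∀ p q, f p = some q → q.1 = p.1) (l : List (Char × Int)) :
    ((l.filterMap f).map Prod.fst).Sublist (l.map Prod.fst) := by
  induction l with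
  | nil => simp
  | cons hd tl ih =>
    simp only [List.filterMap_cons, List.map_cons]
    cases hfh : f hd with
    | none => exact ih.cons _
    | some q =>
      simp only [List.map_cons]
      rw [hf hd q hfh]
      exact ih.cons₂ _

lemma pv_nodup_keys_dec1 (c : Char) (d : PySem.Dict Char Int) (hn : d.keys.Nodup) :
    (pvDec1 c d).keys.Nodup := by
  simp only [PySem.Dict.keys, pvDec1] at *
  refine (pv_keys_filterMap_sublist _ ?_ _).nodup hn
  intro p q h
  split_ifs at h with h1 h2 <;> (simp only [Option.some_inj] at h; rw [← h])

lemma pv_nodup_keys_decAll (d : PySem.Dict Char Int) (hn : d.keys.Nodup) :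
    (pvDecAll d).keys.Nodup := by
  simp only [PySem.Dict.keys, pvDecAll] at *
  refine (pv_keys_filterMap_sublist _ ?_ _).nodup hn
  intro p q h
  split_ifs at h
  · simp only [Option.some_inj] at h; rw [← h]

lemma pv_mem_keys_dec1 (c x : Char) (d : PySem.Dict Char Int) (hx : x ∈ d.keys) (hne : x ≠ c) :
    x ∈ (pvDec1 c d).keys := by
  simp only [PySem.Dict.keys, pvDec1, List.mem_map] at *
  obtain ⟨p, hp, rfl⟩ := hx
  refine ⟨p, ?_, rfl⟩
  simp only [List.mem_filterMap]
  exact ⟨p, hp, by simp [hne]⟩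

lemma pv_mem_items_decAll (q : Char × Int) (d : PySem.Dict Char Int) :
    q ∈ (pvDecAll d).items ↔ ∃ p ∈ d.items, p.2 ≠ 1 ∧ q = (p.1, p.2 - 1) := by
  simp only [pvDecAll, List.mem_filterMap]
  constructor
  · rintro ⟨p, hp, h⟩
    split_ifs at h with h1
    · simp only [Option.some_inj] at h
      exact ⟨p, hp, h1, h.symm⟩
  · rintro ⟨p, hp, h1, rfl⟩
    exact ⟨p, hp, by simp [h1]⟩

lemma pv_filter_map_eq_filterMap (u : Char × Int → Char × Int) (q : Char × Int → Bool)
    (f : Char × Int → Option (Char × Int)) (l : List (Char × Int))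
    (h : ∀ p ∈ l, (if q (u p) = true then some (u p) else none) = f p) :
    (l.map u).filter q = l.filterMap f := by
  induction l with
  | nil => simp
  | cons hd tl ih =>
    have hhd := h hd (by simp)
    have ih' := ih (fun p hp => h p (by simp [hp]))
    simp only [List.map_cons, List.filter_cons, List.filterMap_cons]
    by_cases hq : q (u hd) = true
    · simp only [hq, if_true] at hhd ⊢
      rw [← hhd, ih']
    · simp [hq, ih', ← hhd]

lemma pv_map_eq_filterMap (u : Char × Int → Char × Int)
    (f : Char × Int → Option (Char × Int)) (l : List (Char × Int))
    (h : ∀ p ∈ l, some (u p) = f p) :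
    l.map u = l.filterMap f := by
  induction l with
  | nil => simp
  | cons hd tl ih =>
    simp only [List.map_cons, List.filterMap_cons, ← h hd (by simp)]
    rw [ih (fun p hp => h p (by simp [hp]))]

lemma pv_step1 (res : List Char) (d : PySem.Dict Char Int) (c : Char)
    (hn : d.keys.Nodup) (hc : c ∈ d.keys) :
    pvStepA (res, d) c = (res ++ [c], pvDec1 c d) := by
  have hcont : d.contains c = true := (PySem.Dict.contains_iff_mem_keys d c).mpr hc
  have hval : ∀ p ∈ d.items, p.1 = c → p.2 = d.getD c 0 := by
    intro p hp hpc
    have : (c, p.2) ∈ d.items := by rw [← hpc]; exact hp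
    exact (PySem.Dict.getD_of_mem_items d this hn 0).symm
  simp only [pvStepA, PySem.Dict.modify]
  rw [PySem.Dict.getD_insert_self]
  by_cases hv : d.getD c 0 - 1 = 0
  · simp only [hv, beq_self_eq_true, if_true]
    refine Prod.ext rfl (PySem.Dict.ext ?_)
    simp only [PySem.Dict.erase, PySem.Dict.items_insert_of_contains d _ hcont, pvDec1]
    refine pv_filter_map_eq_filterMap _ _ _ _ ?_
    intro p hp
    by_cases hpc : p.1 = c
    · have h2 : p.2 = 1 := by have := hval p hp hpc; omega
      simp [hpc, h2]
    · simp [hpc, (by simpa using hpc : (p.1 == c) = false)]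
  · rw [if_neg (by simpa using hv)]
    refine Prod.ext rfl (PySem.Dict.ext ?_)
    simp only [PySem.Dict.items_insert_of_contains d _ hcont, pvDec1]
    refine pv_map_eq_filterMap _ _ _ ?_
    intro p hp
    by_cases hpc : p.1 = c
    · have h2 := hval p hp hpc
      have h21 : p.2 ≠ 1 := by omega
      simp [hpc, h21, ← h2]
    · simp [hpc, (by simpa using hpc : (p.1 == c) = false)]

lemma pv_decOn_nil (d : PySem.Dict Char Int) : pvDecOn [] d = d := by
  apply PySem.Dict.ext
  simp [pvDecOn]

lemma pv_decOn_dec1 (c : Char) (L : List Char) (d : PySem.Dict Char Int) (hc : c ∉ L) :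
    pvDecOn L (pvDec1 c d) = pvDecOn (c :: L) d := by
  apply PySem.Dict.ext
  simp only [pvDecOn, pvDec1, List.filterMap_filterMap]
  refine List.filterMap_congr ?_
  intro p _
  by_cases hpc : p.1 = c
  · by_cases h2 : p.2 = 1 <;> simp [hpc, h2, hc]
  · by_cases hL : p.1 ∈ L <;> by_cases h2 : p.2 = 1 <;> simp [hpc, h2, hL]

lemma pv_pass (L : List Char) : ∀ (res : List Char) (d : PySem.Dict Char Int),
    L.Nodup → d.keys.Nodup → (∀ x ∈ L, x ∈ d.keys) →
    L.foldl pvStepA (res, d) = (res ++ L, pvDecOn L d) := by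
  induction L with
  | nil => intro res d _ _ _; simp [pv_decOn_nil]
  | cons c L ih =>
    intro res d hL hn hsub
    have hcL : c ∉ L := (List.nodup_cons.mp hL).1
    simp only [List.foldl_cons]
    rw [pv_step1 res d c hn (hsub c (by simp))]
    rw [ih (res ++ [c]) (pvDec1 c d) (List.nodup_cons.mp hL).2 (pv_nodup_keys_dec1 c d hn)
      (fun x hx => pv_mem_keys_dec1 c x d (hsub x (by simp [hx]))
        (fun h => hcL (h ▸ hx)))]
    rw [pv_decOn_dec1 c L d hcL]
    simp

lemma pv_decOn_eq_decAll (L : List Char) (d : PySem.Dict Char Int)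
    (hcov : ∀ x ∈ d.keys, x ∈ L) : pvDecOn L d = pvDecAll d := by
  apply PySem.Dict.ext
  simp only [pvDecOn, pvDecAll]
  refine List.filterMap_congr ?_
  intro p hp
  have : p.1 ∈ L := hcov p.1 (by simp only [PySem.Dict.keys]; exact List.mem_map_of_mem hp)
  simp [this]

lemma pv_getD_eq (d : PySem.Dict Char Int) (hn : d.keys.Nodup) (p : Char × Int)
    (hp : p ∈ d.items) : d.getD p.1 0 = p.2 :=
  PySem.Dict.getD_of_mem_items d (by exact hp) hn 0

lemma pv_mem_keys_iff (d : PySem.Dict Char Int) (x : Char) :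
    x ∈ d.keys ↔ ∃ p ∈ d.items, p.1 = x := by
  simp only [PySem.Dict.keys, List.mem_map]

lemma pv_getD_pos (d : PySem.Dict Char Int) (hn : d.keys.Nodup)
    (hpos : ∀ p ∈ d.items, 1 ≤ p.2) (x : Char) (hx : x ∈ d.keys) : 1 ≤ d.getD x 0 := by
  obtain ⟨p, hp, rfl⟩ := (pv_mem_keys_iff d x).mp hx
  rw [pv_getD_eq d hn p hp]
  exact hpos p hp

lemma pv_getD_decAll (d : PySem.Dict Char Int) (hn : d.keys.Nodup) (x : Char) (hx : x ∈ d.keys) :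
    (pvDecAll d).getD x 0 = if d.getD x 0 = 1 then 0 else d.getD x 0 - 1 := by
  obtain ⟨p, hp, rfl⟩ := (pv_mem_keys_iff d x).mp hx
  rw [pv_getD_eq d hn p hp]
  by_cases h1 : p.2 = 1
  · rw [if_pos h1]
    refine PySem.Dict.getD_of_not_contains _ _ ?_
    rw [Bool.eq_false_iff]
    intro hcont
    obtain ⟨q, hq, hq1⟩ := (pv_mem_keys_iff _ p.1).mp ((PySem.Dict.contains_iff_mem_keys _ _).mp hcont)
    obtain ⟨r, hr, hr1, hq2⟩ := (pv_mem_items_decAll q d).mp hq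
    have hrp : r.1 = p.1 := by rw [hq2] at hq1; exact hq1
    have h5 := pv_getD_eq d hn r hr
    have h6 := pv_getD_eq d hn p hp
    rw [hrp, h6] at h5
    omega
  · rw [if_neg h1]
    have hm : (p.1, p.2 - 1) ∈ (pvDecAll d).items :=
      (pv_mem_items_decAll _ d).mpr ⟨p, hp, h1, rfl⟩
    exact PySem.Dict.getD_of_mem_items _ hm (pv_nodup_keys_decAll d hn) 0

lemma pv_filterMap_split (l : List (Char × Int)) :
    l.filterMap (fun p => if p.2 = 1 then none else some (p.1, p.2 - 1))
      = (l.filter (fun p => !(p.2 == 1))).map (fun p => (p.1, p.2 - 1)) := by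
  induction l with
  | nil => simp
  | cons hd tl ih =>
    by_cases h1 : hd.2 = 1 <;> simp [h1, ih]

lemma pv_keys_decAll (d : PySem.Dict Char Int) (hn : d.keys.Nodup)
    (hpos : ∀ p ∈ d.items, 1 ≤ p.2) :
    (pvDecAll d).keys = d.keys.filter (fun c => decide (d.getD c 0 ≥ 2)) := by
  simp only [PySem.Dict.keys, pvDecAll, pv_filterMap_split, List.map_map, List.filter_map]
  rw [← List.filter_map]
  simp only [List.filter_map]
  refine congrArg _ (List.filter_congr ?_)
  intro p hp
  have h := pv_getD_eq d hn p hp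
  have h1 := hpos p hp
  simp only [Function.comp, h]
  by_cases h2 : p.2 = 1
  · simp [h2]
  · have : (2:Int) ≤ p.2 := by omega
    simp [h2, this]

lemma pv_letters_pairwise (d : PySem.Dict Char Int) (hn : d.keys.Nodup) :
    (pvLetters d).Pairwise (· < ·) := by
  have hle := PySem.List.sorted_pairwise d.keys (fun c => c)
  have hnd : (pvLetters d).Nodup := (PySem.List.sorted_perm d.keys (fun c => c) false).nodup_iff.mpr hn
  exact (hle.and hnd).imp (fun h => lt_of_le_of_ne h.1 h.2)

lemma pv_letters_decAll (d : PySem.Dict Char Int) (hn : d.keys.Nodup)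
    (hpos : ∀ p ∈ d.items, 1 ≤ p.2) :
    pvLetters (pvDecAll d) = (pvLetters d).filter (fun c => decide (d.getD c 0 ≥ 2)) := by
  refine PySem.List.sorted_eq_of_perm_of_pairwise_lt _ _ _ ?_ ?_
  · rw [pv_keys_decAll d hn hpos]
    exact (PySem.List.sorted_perm d.keys (fun c => c) false).filter _
  · exact (pv_letters_pairwise d hn).sublist List.filter_sublist

lemma pv_sorted_rev_decAll (d : PySem.Dict Char Int) (hn : d.keys.Nodup)
    (hpos : ∀ p ∈ d.items, 1 ≤ p.2) :
    PySem.List.sorted (pvDecAll d).keys (fun c => c) true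
      = ((pvLetters d).filter (fun c => decide (d.getD c 0 ≥ 2))).reverse := by
  refine PySem.List.sorted_rev_eq_of_perm_of_pairwise_gt _ _ _ ?_ ?_
  · refine (List.reverse_perm _).trans ?_
    rw [pv_keys_decAll d hn hpos]
    exact (PySem.List.sorted_perm d.keys (fun c => c) false).filter _
  · rw [List.pairwise_reverse]
    exact (pv_letters_pairwise d hn).sublist List.filter_sublist

lemma pv_rowshift (d : PySem.Dict Char Int) (hn : d.keys.Nodup)
    (hpos : ∀ p ∈ d.items, 1 ≤ p.2) (p : Nat) (hp : 1 ≤ p) :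
    (pvLetters (pvDecAll d)).filter (fun c => decide ((pvDecAll d).getD c 0 ≥ (p : Int)))
      = (pvLetters d).filter (fun c => decide (d.getD c 0 ≥ ((p : Int) + 1))) := by
  rw [pv_letters_decAll d hn hpos, List.filter_filter]
  refine List.filter_congr ?_
  intro c hc
  have hck : c ∈ d.keys := (PySem.List.sorted_perm d.keys (fun c => c) false).mem_iff.mp hc
  rw [pv_getD_decAll d hn c hck]
  have h1 := pv_getD_pos d hn hpos c hck
  rw [← Bool.decide_and]
  apply decide_eq_decide.mpr
  split_ifs with h2 <;> omega

lemma pv_main (fuel : Nat) : ∀ (m : Nat) (d : PySem.Dict Char Int) (res : List Char),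
    m ≤ 2 * fuel → d.keys.Nodup → (∀ p ∈ d.items, 1 ≤ p.2 ∧ p.2 ≤ (m : Int)) →
    pvLoopA fuel res d = res ++ pvOut d m := by
  induction fuel with
  | zero =>
    intro m d res hm hn hv
    have : m = 0 := by omega
    subst this
    simp [pvLoopA, pvOut]
  | succ fuel ih =>
    intro m d res hm hn hv
    have hpos : ∀ p ∈ d.items, 1 ≤ p.2 := fun p hp => (hv p hp).1
    by_cases hemp : d.items = []
    · have hk : d.keys = [] := by simp [PySem.Dict.keys, hemp]
      have hl : pvLetters d = [] := by
        simp [pvLetters, hk, (PySem.List.sorted_eq_nil_iff ([] : List Char) (fun c => c) false).mpr rfl]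
      have hrow : ∀ i, pvRow d (i+1) = [] := by intro i; simp [pvRow, hl]
      have hout : pvOut d m = [] := by
        simp only [pvOut]
        rw [List.flatten_eq_nil_iff]
        intro l hl'
        obtain ⟨i, _, rfl⟩ := List.mem_map.mp hl'
        exact hrow i
      have hsz : d.size == 0 := by simp [PySem.Dict.size, hemp]
      simp [pvLoopA, hsz, hout]
    · -- nonempty dict
      have hsz : (d.size == 0) = false := by
        simp [PySem.Dict.size, List.length_eq_zero_iff, hemp]
      obtain ⟨p0, hp0⟩ := List.exists_mem_of_ne_nil _ hemp
      have hm1 : 1 ≤ m := by have := hv p0 hp0; omega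
      set L := pvLetters d with hLdef
      have hLperm := PySem.List.sorted_perm d.keys (fun c => c) false
      have hLnd : L.Nodup := hLperm.nodup_iff.mpr hn
      have hLsub : ∀ x ∈ L, x ∈ d.keys := fun x hx => hLperm.mem_iff.mp hx
      have hLcov : ∀ x ∈ d.keys, x ∈ L := fun x hx => hLperm.mem_iff.mpr hx
      set d1 := pvDecAll d with hd1
      have hn1 : d1.keys.Nodup := pv_nodup_keys_decAll d hn
      have hpos1 : ∀ p ∈ d1.items, 1 ≤ p.2 := by
        intro p hp
        obtain ⟨q, hq, hq1, rfl⟩ := (pv_mem_items_decAll p d).mp hp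
        have := hpos q hq; simp; omega
      set g : Char → Bool := fun c => decide (d.getD c 0 ≥ 2) with hg
      set L2 : List Char := (L.filter g).reverse with hL2
      have hL2nd : L2.Nodup := by
        rw [hL2, List.nodup_reverse]
        exact hLnd.sublist List.filter_sublist
      have hkeys1 : d1.keys = d.keys.filter g := pv_keys_decAll d hn hpos
      have hL2sub : ∀ x ∈ L2, x ∈ d1.keys := by
        intro x hx
        rw [hL2, List.mem_reverse, List.mem_filter] at hx
        rw [hkeys1, List.mem_filter]
        exact ⟨hLsub x hx.1, hx.2⟩
      have hL2cov : ∀ x ∈ d1.keys, x ∈ L2 := by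
        intro x hx
        rw [hkeys1, List.mem_filter] at hx
        rw [hL2, List.mem_reverse, List.mem_filter]
        exact ⟨hLcov x hx.1, hx.2⟩
      set d2 := pvDecAll d1 with hd2
      have hn2 : d2.keys.Nodup := pv_nodup_keys_decAll d1 hn1
      have hv2 : ∀ p ∈ d2.items, 1 ≤ p.2 ∧ p.2 ≤ ((m - 2 : Nat) : Int) := by
        intro p hp
        obtain ⟨q, hq, hq1, he1⟩ := (pv_mem_items_decAll p d1).mp hp
        obtain ⟨r, hr, hr1, he2⟩ := (pv_mem_items_decAll q d).mp hq
        have h1 := hv r hr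
        have h2 := hpos1 q hq
        have e1 : p.2 = q.2 - 1 := by rw [he1]
        have e2 : q.2 = r.2 - 1 := by rw [he2]
        omega
      -- unfold one iteration of the loop
      rw [show pvLoopA (fuel+1) res d =
        (if d.size == 0 then res
         else
           let st1 := (PySem.List.sorted d.keys (fun c => c) false).foldl pvStepA (res, d)
           let st2 := (PySem.List.sorted st1.2.keys (fun c => c) true).foldl pvStepA st1
           pvLoopA fuel st2.1 st2.2) from rfl]
      rw [hsz]
      simp only [Bool.false_eq_true, if_false]
      rw [show PySem.List.sorted d.keys (fun c => c) false = L from rfl]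
      rw [pv_pass L res d hLnd hn hLsub, pv_decOn_eq_decAll L d hLcov]
      rw [pv_sorted_rev_decAll d hn hpos, ← hL2]
      rw [pv_pass L2 (res ++ L) d1 hL2nd hn1 hL2sub, pv_decOn_eq_decAll L2 d1 hL2cov]
      simp only
      rw [ih (m - 2) d2 (res ++ L ++ L2) (by omega) hn2 hv2]
      -- now the pure row algebra
      have hrow1 : pvRow d 1 = L := by
        simp only [pvRow]
        rw [if_neg (by decide)]
        rw [List.filter_eq_self.mpr]
        intro c hc
        have := pv_getD_pos d hn hpos c (hLsub c hc)
        simpa using this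
      have hrowshift : ∀ i : Nat, pvRow d2 (i+1) = pvRow d (i+3) := by
        intro i
        have e1 := pv_rowshift d1 hn1 hpos1 (i+1) (by omega)
        have e2 := pv_rowshift d hn hpos (i+2) (by omega)
        have ecast : ((i+1 : Nat) : Int) + 1 = ((i+2 : Nat) : Int) := by push_cast; ring
        have ecast2 : ((i+2 : Nat) : Int) + 1 = ((i+3 : Nat) : Int) := by push_cast; ring
        rw [ecast] at e1
        rw [ecast2] at e2
        simp only [pvRow, ← hd2, ← hd1] at *
        rw [e1, e2]
        have hpar : ((i+1) % 2 == 0) = ((i+3) % 2 == 0) := by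
          have : (i+3) % 2 = (i+1) % 2 := by omega
          rw [this]
        rw [hpar]
      rcases Nat.lt_or_ge m 2 with hm2 | hm2
      · -- m = 1
        have hmeq : m = 1 := by omega
        subst hmeq
        have hall1 : ∀ c ∈ L, ¬ g c = true := by
          intro c hc
          have hck := hLsub c hc
          simp only [PySem.Dict.keys, List.mem_map] at hck
          obtain ⟨q, hq, hq1⟩ := hck
          have hgd : d.getD c 0 = q.2 := by rw [← hq1]; exact pv_getD_eq d hn q hq
          have := hv q hq
          simp only [hg, hgd, decide_eq_true_eq]
          omega
        have hL2nil : L2 = [] := by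
          rw [hL2, List.filter_eq_nil_iff.mpr hall1]
          rfl
        have hout : pvOut d 1 = L := by
          simp [pvOut, List.range_succ, hrow1]
        rw [hL2nil, hout]
        simp [pvOut]
      · -- m ≥ 2
        obtain ⟨k, rfl⟩ : ∃ k, m = 2 + k := ⟨m - 2, by omega⟩
        simp only [show 2 + k - 2 = k from by omega]
        have hout : pvOut d (2 + k) = L ++ L2 ++ pvOut d2 k := by
          simp only [pvOut, List.range_add, List.map_append, List.map_map, List.flatten_append]
          have h2r : (List.range 2).map (fun i => pvRow d (i+1)) = [pvRow d 1, pvRow d 2] := by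
            rfl
          rw [h2r]
          have hrow2 : pvRow d 2 = L2 := by
            simp only [pvRow]
            rw [if_pos (by decide)]
            rw [hL2, hg]
            congr 1
          have hshift : (List.range k).map ((fun i => pvRow d (i+1)) ∘ (fun x => 2 + x))
              = (List.range k).map (fun i => pvRow d2 (i+1)) := by
            refine List.map_congr_left ?_
            intro i _
            simp only [Function.comp]
            rw [show 2 + i + 1 = i + 3 from by omega, ← hrowshift i]
          rw [hshift]
          simp [hrow1, hrow2, List.append_assoc]
        rw [hout]
        simp [List.append_assoc]


lemma pv_pyRange_one (mf : Int) (h0 : 0 ≤ mf) :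
    PySem.List.pyRange 1 (mf + 1) 1 = (List.range mf.toNat).map (fun k : Nat => 1 + 1 * (k : Int)) := by
  simp only [PySem.List.pyRange]
  rw [if_neg (by norm_num)]
  rcases lt_or_ge 0 mf with hpos | hz
  · rw [if_pos (by norm_num), if_pos (by omega)]
    have he : (mf + 1 - 1 + 1 - 1) / 1 = mf := by
      rw [Int.ediv_one]; ring
    rw [he]
  · have : mf = 0 := by omega
    subst this
    rw [if_pos (by norm_num), if_neg (by norm_num)]
    simp

lemma pv_counter_facts (xs : List Char) :
    (∀ p ∈ (PySem.Dict.counter xs).items, 1 ≤ p.2 ∧ p.2 ≤ (xs.length : Int)) := by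
  intro p hp
  rw [PySem.Dict.items_counter] at hp
  obtain ⟨k, hk, rfl⟩ := List.mem_map.mp hp
  have hmem : k ∈ xs := (PySem.Set.mem_ofList xs k).mp hk
  constructor
  · simp only
    exact_mod_cast List.count_pos_iff.mpr hmem
  · simp only
    exact_mod_cast List.count_le_length

-- ===== VERDICT (by name: the statement is the Claim_ definition above) =====
theorem incDecString_spec : Claim_equal_incDecString := by
  intro s _
  unfold Spec_incDecString
  set xs := s.toList with hxs
  set d0 := PySem.Dict.counter xs with hd0
  set mf := PySem.List.maxD d0.values (fun v => v) 0 with hmf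
  have hn0 : d0.keys.Nodup := PySem.Dict.nodup_keys_counter xs
  have hcnt := pv_counter_facts xs
  -- bounds on mf
  have hmf_facts : 0 ≤ mf ∧ mf ≤ (xs.length : Int) ∧ ∀ v ∈ d0.values, v ≤ mf := by
    rw [hmf]
    cases hmax : PySem.List.max? d0.values (fun v => v) with
    | none =>
      have hvnil : d0.values = [] := (PySem.List.max?_eq_none_iff _ _).mp hmax
      refine ⟨by simp [PySem.List.maxD, hmax], by simp [PySem.List.maxD, hmax], ?_⟩
      simp [hvnil]
    | some mx =>
      have hmem : mx ∈ d0.values := PySem.List.max?_mem hmax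
      obtain ⟨p, hp, hp2⟩ := List.mem_map.mp hmem
      have h1 := hcnt p hp
      have hle := PySem.List.max?_isMax hmax
      refine ⟨?_, ?_, ?_⟩
      · simp [PySem.List.maxD, hmax]; omega
      · simp [PySem.List.maxD, hmax]; omega
      · intro v hv
        simpa [PySem.List.maxD, hmax] using hle v hv
  obtain ⟨h0, hlen, hub⟩ := hmf_facts
  have hvals : ∀ p ∈ d0.items, 1 ≤ p.2 ∧ p.2 ≤ ((mf.toNat : Nat) : Int) := by
    intro p hp
    refine ⟨(hcnt p hp).1, ?_⟩
    rw [Int.toNat_of_nonneg h0]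
    exact hub p.2 (List.mem_map_of_mem hp)
  -- A side
  have hA : incDecString s = String.ofList (pvOut d0 mf.toNat) := by
    rw [incDecString, ← hxs, ← hd0]
    rw [pv_main (xs.length + 1) mf.toNat d0 [] (by omega) hn0 hvals]
    rfl
  -- B side
  have hB : incDecString_alt s = String.ofList (pvOut d0 mf.toNat) := by
    rw [incDecString_alt, ← hxs, ← hd0]
    simp only [← hmf]
    congr 1
    rw [PySem.List.foldl_append_singleton_eq_map, List.nil_append]
    rw [pv_pyRange_one mf h0, List.map_map]
    simp only [pvOut]
    congr 1
    refine List.map_congr_left ?_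
    intro k _
    simp only [Function.comp]
    have hcast : (1 : Int) + 1 * (k : Int) = ((k + 1 : Nat) : Int) := by push_cast; ring
    simp only [hcast]
    simp only [pvRow, pvLetters]
    have hmod : PySem.Int.mod ((k + 1 : Nat) : Int) 2 = (((k + 1) % 2 : Nat) : Int) := by
      exact_mod_cast PySem.Int.mod_natCast (k+1) 2
    rw [hmod]
    have hbeq : ((((k + 1) % 2 : Nat) : Int) == 0) = ((k + 1) % 2 == 0) := by
      rcases Nat.mod_two_eq_zero_or_one (k+1) with h | h <;> rw [h] <;> rfl
    rw [hbeq]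
  rw [hA, hB]
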